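-- pv_equiv track=rewrite | github.com/john00003/farkleRL | src/testing.py | _helper_flip_lock
-- ===== SOURCE A (Python) =====
-- def _helper_flip_lock(string, dice_values, dice_locked):
--     """
--     returns a new array of which dice are locked after the player has attempted to lock a combination of dice
--
--     Parameters
--     ----------
--     string: string
--         a string indicating the values of the dice the player is trying to lock
--     dice_values: array-like
--         an array of integers indicating the value of each die in each position
--     dice_locked: array-like
--         0 if the die is unlocked, 1 otherwise
--
--     Returns
--     -------
--     new_locked: array-like
--         0 if the die was previously locked, but we are unlocking it by redeeming some combination of points, 1 otherwise
--     """
--     new_locked = [x for x in dice_locked]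
--     for char in string:
--         x = int(char)
--         for i, value in enumerate(dice_values): # we find a dice of matching value and undo the lock
--             if value == x and new_locked[i]:
--                 new_locked[i] = 0
--                 break
--     return new_locked
-- ===== SOURCE B (Python) =====
-- def _helper_flip_lock(string, dice_values, dice_locked):
--     # Index-first strategy: per value, a queue of locked-die indices in ascending
--     # order; each requested character pops the front index of its value's queue.
--     queues = {}
--     for i, value in enumerate(dice_values):
--         if dice_locked[i]:
--             queues.setdefault(value, []).append(i)
--     new_locked = list(dice_locked)
--     for char in string:
--         q = queues.get(int(char))
--         if q:
--             new_locked[q.pop(0)] = 0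
--     return new_locked
-- ===== Notes on version B (the rewrite author's own statement) =====
-- stated objective: alternative
-- what changed: A rescans the whole dice list once per character of the string; B first builds a dict mapping each value to the ascending queue of its locked indices in one pass over the dice, then each character just pops the front index of its value's queue and clears that slot.
-- outside the precondition, e.g. on _helper_flip_lock('1', [1, 1], [1]): A returns [0], B raises IndexError
import Mathlib
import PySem

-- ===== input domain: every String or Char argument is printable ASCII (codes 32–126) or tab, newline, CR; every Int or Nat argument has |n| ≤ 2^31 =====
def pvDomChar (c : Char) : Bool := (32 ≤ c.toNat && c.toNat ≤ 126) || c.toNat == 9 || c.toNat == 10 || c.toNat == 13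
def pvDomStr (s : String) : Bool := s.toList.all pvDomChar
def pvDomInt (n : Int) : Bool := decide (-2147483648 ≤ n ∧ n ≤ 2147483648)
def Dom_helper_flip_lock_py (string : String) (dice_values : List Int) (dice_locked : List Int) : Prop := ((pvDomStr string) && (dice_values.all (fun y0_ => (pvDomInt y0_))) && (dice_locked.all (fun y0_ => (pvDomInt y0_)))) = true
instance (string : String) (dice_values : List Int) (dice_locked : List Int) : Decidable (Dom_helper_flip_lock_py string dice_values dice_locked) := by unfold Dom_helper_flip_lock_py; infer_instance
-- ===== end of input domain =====

-- B replaces A's per-character rescan of the dice list by per-value queues of locked-die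
-- indices built once; each character pops the front index of its value's queue ('alternative').
-- Equivalence is about the return value only; neither version mutates its arguments.

-- ===== PORT A =====
-- inner loop 'for i, value in enumerate(dice_values): …' with break; index i carried explicitly.
-- new_locked[i] is ported as List.getD _ _ 0: exact on Pre_ (index always in range there).
def flipInnerA (x : Int) (vals : List Int) (i : Nat) (nl : List Int) : List Int :=
  match vals with
  | [] => nl
  | v :: rest =>
      if v = x ∧ nl.getD i 0 ≠ 0 then nl.set i 0   -- break
      else flipInnerA x rest (i + 1) nl

def helper_flip_lock_py (string : String) (dice_values : List Int) (dice_locked : List Int) : List Int :=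
  -- new_locked = [x for x in dice_locked]; for char in string: x = int(char); inner scan
  string.toList.foldl (fun nl c => flipInnerA ((c.toNat : Int) - 48) dice_values 0 nl)
    (dice_locked.map (fun x => x))

-- ===== PORT B =====
-- 'for i, value in enumerate(dice_values): if dice_locked[i]: queues.setdefault(value, []).append(i)';
-- enumerate carried as an explicit index; dice_locked[i] ported as getD (in range on Pre_).
def buildQ (locked : List Int) (vals : List Int) (i : Nat) (d : PySem.Dict Int (List Nat)) :
    PySem.Dict Int (List Nat) :=
  match vals with
  | [] => d
  | v :: rest =>
      buildQ locked rest (i + 1)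
        (if locked.getD i 0 ≠ 0 then d.insert v (d.getD v [] ++ [i]) else d)

-- 'for char in string: q = queues.get(int(char)); if q: new_locked[q.pop(0)] = 0'
def consumeQ (d : PySem.Dict Int (List Nat)) (nl : List Int) (cs : List Char) : List Int :=
  match cs with
  | [] => nl
  | c :: cs =>
      match d.getD ((c.toNat : Int) - 48) [] with
      | [] => consumeQ d nl cs
      | i :: rest => consumeQ (d.insert ((c.toNat : Int) - 48) rest) (nl.set i 0) cs

def helper_flip_lock_py_alt (string : String) (dice_values : List Int) (dice_locked : List Int) : List Int :=
  -- new_locked = list(dice_locked)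
  consumeQ (buildQ dice_locked dice_values 0 PySem.Dict.empty) dice_locked string.toList

-- ===== PRECONDITION & SPEC =====
-- Pre_ excludes (a) strings with a non-digit character, where A raises ValueError at int(char), and
-- (b) dice_values longer than dice_locked, where A can raise IndexError depending on the dynamic
-- lock state (on the few such inputs where A still returns, B raises IndexError at dice_locked[i]).
def Pre_helper_flip_lock_py (string : String) (dice_values : List Int) (dice_locked : List Int) : Prop :=
  (string.toList.all (fun c => '0' ≤ c ∧ c ≤ '9')) ∧ dice_values.length ≤ dice_locked.length

instance (string : String) (dice_values : List Int) (dice_locked : List Int) : Decidable (Pre_helper_flip_lock_py string dice_values dice_locked) := by unfold Pre_helper_flip_lock_py; infer_instance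

def pvWitness_helper_flip_lock_py : String × List Int × List Int := ("12", [1, 2, 3], [1, 1, 0])

def Spec_helper_flip_lock_py (string : String) (dice_values : List Int) (dice_locked : List Int) (out : List Int) : Prop := out = helper_flip_lock_py_alt string dice_values dice_locked
instance (string : String) (dice_values : List Int) (dice_locked : List Int) (out : List Int) : Decidable (Spec_helper_flip_lock_py string dice_values dice_locked out) := by unfold Spec_helper_flip_lock_py; infer_instance

-- ===== CLAIM (what is proved, stated in full; the proofs are below) =====
def Claim_equal_helper_flip_lock_py : Prop := ∀ (string : String) (dice_values : List Int) (dice_locked : List Int), Dom_helper_flip_lock_py string dice_values dice_locked → Pre_helper_flip_lock_py string dice_values dice_locked → Spec_helper_flip_lock_py string dice_values dice_locked (helper_flip_lock_py string dice_values dice_locked)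

-- ===== LEMMAS AND PROOFS =====

-- the queue B keeps for value v, characterised positionally: ascending indices of
-- still-locked dice of value v
def qspec (vals nl : List Int) (v : Int) : List Nat :=
  (List.range vals.length).filter (fun j => vals.getD j 0 == v && nl.getD j 0 != 0)

theorem lt_of_getD_ne_zero {nl : List Int} {i : Nat} (h : nl.getD i 0 ≠ 0) : i < nl.length := by
  by_contra h'
  push_neg at h'
  rw [List.getD_eq_default _ _ h'] at h
  exact h rfl

theorem getD_set_zero_self (nl : List Int) (i : Nat) (h : i < nl.length) :
    (nl.set i 0).getD i 0 = 0 := by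
  simp [List.getD_eq_getElem?_getD, h]

theorem getD_set_zero_ne (nl : List Int) (i j : Nat) (h : j ≠ i) :
    (nl.set i 0).getD j 0 = nl.getD j 0 := by
  simp [List.getD_eq_getElem?_getD, Ne.symm h]

-- A's inner scan unlocks the first still-locked die of value x, i.e. the head of qspec
theorem flipA_char (x : Int) (vals : List Int) : ∀ (k : Nat) (nl : List Int),
    flipInnerA x vals k nl =
      match (List.range vals.length).filter
          (fun j => vals.getD j 0 == x && nl.getD (k + j) 0 != 0) with
      | [] => nl
      | j :: _ => nl.set (k + j) 0 := by
  induction vals with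
  | nil => intro k nl; simp [flipInnerA]
  | cons v vs ih =>
    intro k nl
    rw [flipInnerA]
    have hrange : List.range (v :: vs).length = 0 :: (List.range vs.length).map Nat.succ := by
      simp [List.range_succ_eq_map]
    rw [hrange, List.filter_cons]
    by_cases hc : v = x ∧ nl.getD k 0 ≠ 0
    · have hp : ((v :: vs).getD 0 0 == x && nl.getD (k + 0) 0 != 0) = true := by
        rw [List.getD_cons_zero, Nat.add_zero, hc.1]
        simp only [beq_self_eq_true, Bool.true_and]
        exact bne_iff_ne.mpr hc.2
      rw [if_pos hc, hp]
      simp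
    · have hp : ((v :: vs).getD 0 0 == x && nl.getD (k + 0) 0 != 0) = false := by
        by_cases h1 : v = x
        · have h2 : nl.getD k 0 = 0 := by
            by_contra h2; exact hc ⟨h1, h2⟩
          rw [List.getD_cons_zero, Nat.add_zero, h2]
          simp
        · rw [List.getD_cons_zero]
          simp [h1]
      rw [if_neg hc, hp, if_neg (by simp), List.filter_map]
      have hpred : ((fun j => (v :: vs).getD j 0 == x && nl.getD (k + j) 0 != 0) ∘ Nat.succ)
          = (fun j => vs.getD j 0 == x && nl.getD ((k + 1) + j) 0 != 0) := by
        funext j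
        have : k + Nat.succ j = (k + 1) + j := by omega
        simp [Function.comp, this]
      rw [hpred, ih (k + 1) nl]
      cases hfil : (List.range vs.length).filter
          (fun j => vs.getD j 0 == x && nl.getD ((k + 1) + j) 0 != 0) with
      | nil => simp
      | cons j js =>
        have : k + Nat.succ j = (k + 1) + j := by omega
        simp [this]

-- B's build pass produces exactly the qspec queues (with an accumulator and offset)
theorem buildQ_char (locked : List Int) (vals : List Int) :
    ∀ (k : Nat) (d : PySem.Dict Int (List Nat)) (v : Int),
    (buildQ locked vals k d).getD v [] =
      d.getD v [] ++ ((List.range vals.length).filter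
          (fun j => vals.getD j 0 == v && locked.getD (k + j) 0 != 0)).map (fun j => k + j) := by
  induction vals with
  | nil => intro k d v; simp [buildQ]
  | cons w vs ih =>
    intro k d v
    rw [buildQ, ih]
    have hrange : List.range (w :: vs).length = 0 :: (List.range vs.length).map Nat.succ := by
      simp [List.range_succ_eq_map]
    rw [hrange, List.filter_cons, List.filter_map]
    have hpred : ((fun j => (w :: vs).getD j 0 == v && locked.getD (k + j) 0 != 0) ∘ Nat.succ)
        = (fun j => vs.getD j 0 == v && locked.getD ((k + 1) + j) 0 != 0) := by
      funext j
      have : k + Nat.succ j = (k + 1) + j := by omega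
      simp [Function.comp, this]
    rw [hpred]
    have hmapmap : ∀ l : List Nat, (l.map Nat.succ).map (fun j => k + j)
        = l.map (fun j => (k + 1) + j) := by
      intro l
      rw [List.map_map]
      exact List.map_congr_left (fun j _ => by simp [Function.comp]; omega)
    by_cases hl : locked.getD k 0 ≠ 0
    · rw [if_pos hl]
      by_cases hw : w = v
      · subst hw
        have hp : ((w :: vs).getD 0 0 == w && locked.getD (k + 0) 0 != 0) = true := by
          rw [List.getD_cons_zero, Nat.add_zero]
          simp only [beq_self_eq_true, Bool.true_and]
          exact bne_iff_ne.mpr hl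
        rw [hp, if_pos rfl]
        simp only [List.map_cons, hmapmap, Nat.add_zero]
        rw [PySem.Dict.getD_insert]
        simp [List.append_assoc]
      · have hp : ((w :: vs).getD 0 0 == v && locked.getD (k + 0) 0 != 0) = false := by
          rw [List.getD_cons_zero]
          simp [hw]
        rw [hp, if_neg (by simp), PySem.Dict.getD_insert, if_neg (Ne.symm hw)]
        rw [hmapmap]
    · rw [if_neg hl]
      push_neg at hl
      have hp : ((w :: vs).getD 0 0 == v && locked.getD (k + 0) 0 != 0) = false := by
        rw [List.getD_cons_zero, Nat.add_zero, hl]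
        simp
      rw [hp, if_neg (by simp), hmapmap]

theorem qspec_head {vals nl : List Int} {x : Int} {i : Nat} {rest : List Nat}
    (h : qspec vals nl x = i :: rest) : vals.getD i 0 = x ∧ nl.getD i 0 ≠ 0 := by
  have hmem : i ∈ qspec vals nl x := by rw [h]; exact List.mem_cons_self
  unfold qspec at hmem
  have := List.of_mem_filter hmem
  simpa using this

theorem qspec_set_self {vals nl : List Int} {x : Int} {i : Nat} {rest : List Nat}
    (h : qspec vals nl x = i :: rest) : qspec vals (nl.set i 0) x = rest := by
  obtain ⟨hvx, hnl⟩ := qspec_head h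
  have hlt : i < nl.length := lt_of_getD_ne_zero hnl
  have hnodup : (qspec vals nl x).Nodup := List.Nodup.filter _ (List.nodup_range)
  rw [h] at hnodup
  have hnotin : i ∉ rest := (List.nodup_cons.mp hnodup).1
  unfold qspec
  have hcong : (List.range vals.length).filter
        (fun j => vals.getD j 0 == x && (nl.set i 0).getD j 0 != 0)
      = (List.range vals.length).filter
        (fun j => !(j == i) && (vals.getD j 0 == x && nl.getD j 0 != 0)) := by
    apply List.filter_congr
    intro j _
    by_cases hj : j = i
    · subst hj
      rw [getD_set_zero_self nl j hlt]
      simp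
    · rw [getD_set_zero_ne nl i j hj]
      simp [hj]
  have hfil : (List.range vals.length).filter
      (fun j => vals.getD j 0 == x && nl.getD j 0 != 0) = i :: rest := h
  rw [hcong, ← List.filter_filter, hfil, List.filter_cons]
  simp only [beq_self_eq_true, Bool.not_true, Bool.false_eq_true, if_false]
  exact List.filter_eq_self.mpr (fun a ha => by simp [ne_of_mem_of_not_mem ha hnotin])

theorem qspec_set_ne {vals nl : List Int} {x v : Int} {i : Nat}
    (hvx : v ≠ x) (hix : vals.getD i 0 = x) :
    qspec vals (nl.set i 0) v = qspec vals nl v := by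
  unfold qspec
  apply List.filter_congr
  intro j _
  by_cases hj : j = i
  · subst hj
    rw [hix]
    have hxv : (x == v) = false := by simp [Ne.symm hvx]
    rw [hxv]
    simp
  · rw [getD_set_zero_ne nl i j hj]

-- B's consume pass, under the queue invariant, equals A's per-character fold
theorem consume_eq (vals : List Int) : ∀ (cs : List Char) (d : PySem.Dict Int (List Nat)) (nl : List Int),
    (∀ v, d.getD v [] = qspec vals nl v) →
    consumeQ d nl cs = cs.foldl (fun nl c => flipInnerA ((c.toNat : Int) - 48) vals 0 nl) nl := by
  intro cs
  induction cs with
  | nil => intro d nl _; rfl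
  | cons c cs ih =>
    intro d nl hinv
    have hA : flipInnerA ((c.toNat : Int) - 48) vals 0 nl
        = match qspec vals nl ((c.toNat : Int) - 48) with
          | [] => nl
          | i :: _ => nl.set i 0 := by
      have := flipA_char ((c.toNat : Int) - 48) vals 0 nl
      simpa [qspec] using this
    rw [List.foldl_cons, consumeQ, hinv ((c.toNat : Int) - 48)]
    cases hq : qspec vals nl ((c.toNat : Int) - 48) with
    | nil =>
      rw [hA, hq]
      exact ih d nl hinv
    | cons i rest =>
      rw [hA, hq]
      apply ih
      intro v
      by_cases hv : v = ((c.toNat : Int) - 48)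
      · subst hv
        rw [PySem.Dict.getD_insert, if_pos rfl, qspec_set_self hq]
      · rw [PySem.Dict.getD_insert, if_neg hv, hinv v, qspec_set_ne hv (qspec_head hq).1]

-- ===== VERDICT (by name: the statement is the Claim_ definition above) =====
theorem helper_flip_lock_py_spec : Claim_equal_helper_flip_lock_py := by
  intro s vals locked _ _
  unfold Spec_helper_flip_lock_py helper_flip_lock_py helper_flip_lock_py_alt
  rw [consume_eq vals s.toList (buildQ locked vals 0 PySem.Dict.empty) locked ?_]
  · simp
  · intro v
    rw [buildQ_char locked vals 0 PySem.Dict.empty v]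
    unfold qspec
    simp
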